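-- pv_equiv track=rewrite | github.com/shubham2338/GFG | Medium/String rp or pr/string-rp-or-pr.py | solve
-- ===== SOURCE A (Python) =====
-- def solve (X, Y, S):
--     def fun(x,y,s,st):
--         stack=[]
--         i=0
--         ans=0
--         while i<len(s):
--             if stack and stack[-1]==st[0] and s[i]==st[1]:
--                 ans+=x
--                 stack.pop(-1)
--             else:
--                 stack.append(s[i])
--             i+=1
--         s=''
--         while stack:
--             s+=stack.pop(-1)
--         i=0
--         while i<len(s):
--             if stack and stack[-1]==st[0] and s[i]==st[1]:
--                 ans+=y
--                 stack.pop(-1)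
--             else:
--                 stack.append(s[i])
--             i+=1
--         return ans
--
--     if X>Y:
--         h=fun(X,Y,S,'pr')
--     else:
--         h=fun(Y,X,S,'rp')
--     return h
-- ===== SOURCE B (Python) =====
-- def solve(X, Y, S):
--     # one pass, no stack: per maximal block of pattern chars, count greedy
--     # first-pattern matches and leftover opener/closer counts, flush on inert chars
--     def onepass(x, y, a, b, s):
--         opn = 0   # pending unmatched a's in current block
--         j = 0     # unmatched b's in current block
--         m = 0     # first-pattern (a then b) matches in current block
--         acc = 0
--         for c in s:
--             if c == a:
--                 opn += 1
--             elif c == b: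
--                 if opn > 0:
--                     opn -= 1
--                     m += 1
--                 else:
--                     j += 1
--             else:
--                 acc += x * m + y * min(j, opn)
--                 opn = j = m = 0
--         return acc + x * m + y * min(j, opn)
--
--     if X > Y:
--         return onepass(X, Y, 'p', 'r', S)
--     else:
--         return onepass(Y, X, 'r', 'p', S)
-- ===== Notes on version B (the rewrite author's own statement) =====
-- stated objective: faster
-- what changed: A runs a greedy stack pass removing the first pattern, pops the leftover stack one char at a time into a reversed string and re-runs the same stack pass on it; B is a single stackless pass keeping three counters (pending openers, unmatched closers, first-pattern matches) per maximal block of pattern characters, flushing both scores when an inert character ends a block.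
import Mathlib
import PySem

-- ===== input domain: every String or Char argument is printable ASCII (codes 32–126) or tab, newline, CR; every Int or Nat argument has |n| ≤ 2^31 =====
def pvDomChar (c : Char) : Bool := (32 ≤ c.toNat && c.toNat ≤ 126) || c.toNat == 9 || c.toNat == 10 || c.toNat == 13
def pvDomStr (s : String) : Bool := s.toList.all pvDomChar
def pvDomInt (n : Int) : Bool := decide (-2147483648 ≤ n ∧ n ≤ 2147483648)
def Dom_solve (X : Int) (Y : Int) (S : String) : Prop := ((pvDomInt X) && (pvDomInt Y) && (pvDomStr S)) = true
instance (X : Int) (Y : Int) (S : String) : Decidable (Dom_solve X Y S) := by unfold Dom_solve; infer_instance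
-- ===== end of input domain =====

-- B replaces A's two stack passes (and A's quadratic pop-into-string reversal) by a single
-- stackless counting pass that flushes per block of pattern characters (measured faster).

-- ===== PORT A =====
-- stack with its TOP AT THE HEAD (Python's stack[-1] = head); one while loop of fun
def solveLoop (pts : Int) (a b : Char) : List Char → List Char → Int → (List Char × Int)
  | [], stack, ans => (stack, ans)
  | c :: rest, stack, ans =>
    match stack with
    | t :: tl => if t = a ∧ c = b then solveLoop pts a b rest tl (ans + pts)
                 else solveLoop pts a b rest (c :: t :: tl) ans
    | [] => solveLoop pts a b rest [c] ans

-- s='' ; while stack: s += stack.pop(-1)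
def solveDrain : List Char → List Char → List Char
  | [], acc => acc
  | c :: tl, acc => solveDrain tl (acc ++ [c])

-- the inner def fun(x,y,s,st)
def solveFun (x y : Int) (s : List Char) (a b : Char) : Int :=
  let r1 := solveLoop x a b s [] 0
  let s2 := solveDrain r1.1 []
  let r2 := solveLoop y a b s2 [] r1.2
  r2.2

def solve (X : Int) (Y : Int) (S : String) : Int :=
  if X > Y then solveFun X Y S.toList 'p' 'r' else solveFun Y X S.toList 'r' 'p'

-- ===== PORT B =====
-- one pass over S: opn = pending a's, j = unmatched b's, m = (a,b)-matches, flush on inert chars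
def altPass (x y : Int) (a b : Char) : List Char → Int → Int → Int → Int → Int
  | [], opn, j, m, acc => acc + x * m + y * min j opn
  | c :: rest, opn, j, m, acc =>
    if c = a then altPass x y a b rest (opn + 1) j m acc
    else if c = b then
      (if opn > 0 then altPass x y a b rest (opn - 1) j (m + 1) acc
       else altPass x y a b rest opn (j + 1) m acc)
    else altPass x y a b rest 0 0 0 (acc + x * m + y * min j opn)

def solve_alt (X : Int) (Y : Int) (S : String) : Int :=
  if X > Y then altPass X Y 'p' 'r' S.toList 0 0 0 0 else altPass Y X 'r' 'p' S.toList 0 0 0 0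

-- ===== PRECONDITION & SPEC =====
def Spec_solve (X : Int) (Y : Int) (S : String) (out : Int) : Prop := out = solve_alt X Y S
instance (X : Int) (Y : Int) (S : String) (out : Int) : Decidable (Spec_solve X Y S out) := by unfold Spec_solve; infer_instance

-- ===== CLAIM (what is proved, stated in full; the proofs are below) =====
def Claim_equal_solve : Prop := ∀ (X : Int) (Y : Int) (S : String), Dom_solve X Y S → Spec_solve X Y S (solve X Y S)

-- ===== LEMMAS AND PROOFS =====

-- the head of r is neither a nor b (or r is empty): "older, frozen" part of the stack
def InertOk (a b : Char) : List Char → Prop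
  | [] => True
  | c :: _ => c ≠ a ∧ c ≠ b

-- running count is additive in the initial ans
theorem solveLoop_ans_add (pts : Int) (a b : Char) :
    ∀ (s σ : List Char) (ans : Int),
      solveLoop pts a b s σ ans = ((solveLoop pts a b s σ 0).1, ans + (solveLoop pts a b s σ 0).2) := by
  intro s
  induction s with
  | nil => intro σ ans; simp [solveLoop]
  | cons c rest ih =>
    intro σ ans
    cases σ with
    | nil => simp [solveLoop]; rw [ih [c] ans]
    | cons t tl =>
      by_cases h : t = a ∧ c = b
      · simp only [solveLoop, if_pos h]
        rw [ih tl (ans + pts), ih tl (0 + pts)]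
        simp [add_assoc]
      · simp only [solveLoop, if_neg h]
        rw [ih (c :: t :: tl) ans]

theorem solveDrain_eq : ∀ (u acc : List Char), solveDrain u acc = acc ++ u := by
  intro u
  induction u with
  | nil => simp [solveDrain]
  | cons c tl ih => intro acc; simp [solveDrain, ih]

-- pass-2 count from an empty stack
def p2 (pts : Int) (a b : Char) (u : List Char) : Int := (solveLoop pts a b u [] 0).2

theorem rep_append_cons (c : Char) (n : ℕ) (l : List Char) :
    List.replicate n c ++ c :: l = List.replicate (n + 1) c ++ l := by
  rw [List.replicate_succ']; simp

theorem rep_comm_cons (c : Char) (n : ℕ) (l : List Char) :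
    List.replicate n c ++ c :: l = c :: (List.replicate n c ++ l) := by
  rw [rep_append_cons, List.replicate_succ, List.cons_append]

-- a run of a's is always pushed (a ≠ b)
theorem solveLoop_pushA (pts : Int) (a b : Char) (hab : a ≠ b) :
    ∀ (k : ℕ) (rest σ : List Char) (ans : Int),
      solveLoop pts a b (List.replicate k a ++ rest) σ ans
        = solveLoop pts a b rest (List.replicate k a ++ σ) ans := by
  intro k
  induction k with
  | zero => simp
  | succ n ih =>
    intro rest σ ans
    cases σ with
    | nil =>
      simp only [List.replicate_succ, List.cons_append, solveLoop]
      rw [ih rest [a] ans]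
      simp [rep_comm_cons]
    | cons t tl =>
      simp only [List.replicate_succ, List.cons_append, solveLoop]
      rw [if_neg (show ¬ (t = a ∧ a = b) from fun h => hab h.2),
        ih rest (a :: t :: tl) ans]
      simp [rep_comm_cons]

-- a run of b's is pushed when the top is never a
theorem solveLoop_pushB (pts : Int) (a b : Char) (hab : a ≠ b) :
    ∀ (k : ℕ) (r σ : List Char) (ans : Int), σ.head? ≠ some a →
      solveLoop pts a b (List.replicate k b ++ r) σ ans
        = solveLoop pts a b r (List.replicate k b ++ σ) ans := by
  intro k
  induction k with
  | zero => simp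
  | succ p ih =>
    intro r σ ans hσ
    cases σ with
    | nil =>
      simp only [List.replicate_succ, List.cons_append, solveLoop]
      rw [ih r [b] ans (by simp [Ne.symm hab])]
      simp [rep_comm_cons]
    | cons t tl =>
      have ht : t ≠ a := by simpa using hσ
      simp only [List.replicate_succ, List.cons_append, solveLoop]
      rw [if_neg (show ¬ (t = a ∧ True) by simp [ht]),
        ih r (b :: t :: tl) ans (by simp [Ne.symm hab])]
      simp [rep_comm_cons]

-- a run of b's atop a stack of O a's: pops min, leaves the rest
theorem solveLoop_popB (pts : Int) (a b : Char) (hab : a ≠ b) :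
    ∀ (J O : ℕ) (rest : List Char) (ans : Int),
      solveLoop pts a b (List.replicate J b ++ rest) (List.replicate O a) ans
        = solveLoop pts a b rest
            (if J ≤ O then List.replicate (O - J) a else List.replicate (J - O) b)
            (ans + pts * (min J O : ℕ)) := by
  intro J
  induction J with
  | zero => intro O rest ans; simp
  | succ n ih =>
    intro O rest ans
    cases O with
    | zero =>
      simp only [List.replicate_zero, List.replicate_succ, List.cons_append, solveLoop]
      rw [solveLoop_pushB pts a b hab n rest [b] ans (by simp [Ne.symm hab])]
      simp [rep_comm_cons, List.replicate_succ]
    | succ o =>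
      simp only [List.replicate_succ, List.cons_append, solveLoop]
      rw [if_pos (by simp), ih o rest (ans + pts)]
      by_cases hle : n ≤ o
      · rw [if_pos hle, if_pos (by omega : n + 1 ≤ o + 1)]
        rw [show o + 1 - (n + 1) = o - n by omega]
        congr 1
        rw [show min (n + 1) (o + 1) = min n o + 1 by omega]
        push_cast; ring
      · rw [if_neg hle, if_neg (by omega : ¬ n + 1 ≤ o + 1)]
        rw [show n + 1 - (o + 1) = n - o by omega]
        congr 1
        rw [show min (n + 1) (o + 1) = min n o + 1 by omega]
        push_cast; ring

-- the part of the stack below a non-a char never influences the count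
theorem solveLoop_frozen (pts : Int) (a b : Char) {c : Char} (hc : c ≠ a) :
    ∀ (s ρ σ σ' : List Char) (ans : Int),
      (solveLoop pts a b s (ρ ++ c :: σ) ans).2 = (solveLoop pts a b s (ρ ++ c :: σ') ans).2 := by
  intro s
  induction s with
  | nil => intro ρ σ σ' ans; simp [solveLoop]
  | cons d rest ih =>
    intro ρ σ σ' ans
    cases ρ with
    | nil =>
      have hno : ¬ (c = a ∧ d = b) := fun h => hc h.1
      simp only [List.nil_append, solveLoop, if_neg hno]
      exact ih [d] σ σ' ans
    | cons t tl =>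
      by_cases h : t = a ∧ d = b
      · simp only [List.cons_append, solveLoop, if_pos h]
        exact ih tl σ σ' (ans + pts)
      · simp only [List.cons_append, solveLoop, if_neg h]
        exact ih (d :: t :: tl) σ σ' ans

-- an inert char at the very bottom of the stack behaves like an empty bottom
theorem solveLoop_bottom (pts : Int) (a b : Char) {c : Char} (hc : c ≠ a) :
    ∀ (s ρ : List Char) (ans : Int),
      (solveLoop pts a b s (ρ ++ [c]) ans).2 = (solveLoop pts a b s ρ ans).2 := by
  intro s
  induction s with
  | nil => intro ρ ans; simp [solveLoop]
  | cons d rest ih =>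
    intro ρ ans
    cases ρ with
    | nil =>
      have hno : ¬ (c = a ∧ d = b) := fun h => hc h.1
      simp only [List.nil_append, solveLoop, if_neg hno]
      exact ih [d] ans
    | cons t tl =>
      by_cases h : t = a ∧ d = b
      · simp only [List.cons_append, solveLoop, if_pos h]; exact ih tl (ans + pts)
      · simp only [List.cons_append, solveLoop, if_neg h]; exact ih (d :: t :: tl) ans

-- pass-2 decomposition over one block a^O b^J followed by a frozen rest
theorem p2_block (pts : Int) (a b : Char) (hab : a ≠ b) :
    ∀ (O J : ℕ) (R : List Char), InertOk a b R →
      p2 pts a b (List.replicate O a ++ List.replicate J b ++ R)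
        = pts * (min O J : ℕ) + p2 pts a b R := by
  intro O J R hR
  unfold p2
  rw [List.append_assoc, solveLoop_pushA pts a b hab O (List.replicate J b ++ R) [] 0,
    List.append_nil, solveLoop_popB pts a b hab J O R 0]
  cases R with
  | nil =>
    simp [solveLoop, Nat.min_comm J O]
  | cons e R' =>
    obtain ⟨hea, heb⟩ := hR
    set lf := (if J ≤ O then List.replicate (O - J) a else List.replicate (J - O) b) with hlf
    -- one step: e is pushed (top is a or b or none, e is inert)
    have step : solveLoop pts a b (e :: R') lf (0 + pts * (min J O : ℕ))
        = solveLoop pts a b R' (e :: lf) (0 + pts * (min J O : ℕ)) := by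
      cases hlfc : lf with
      | nil => simp [solveLoop]
      | cons t tl =>
        have hte : ¬ (t = a ∧ e = b) := fun ⟨_, h2⟩ => heb h2
        simp [solveLoop, hte]
    rw [step]
    have hfr : (solveLoop pts a b R' ([] ++ e :: lf) (0 + pts * (min J O : ℕ))).2
        = (solveLoop pts a b R' ([] ++ e :: []) (0 + pts * (min J O : ℕ))).2 :=
      solveLoop_frozen pts a b hea R' [] lf [] (0 + pts * (min J O : ℕ))
    simp only [List.nil_append] at hfr
    rw [hfr]
    have : (solveLoop pts a b R' [e] (0 + pts * (min J O : ℕ))).2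
        = 0 + pts * (min J O : ℕ) + (solveLoop pts a b R' [e] 0).2 := by
      rw [solveLoop_ans_add]
    rw [this]
    have hstep2 : (solveLoop pts a b (e :: R') [] 0).2 = (solveLoop pts a b R' [e] 0).2 := by
      simp [solveLoop]
    rw [← hstep2]
    rw [min_comm]
    push_cast; ring

-- one loop step: push (no match at the top) and pop (match)
theorem solveLoop_push (pts : Int) (a b c : Char) (rest σ : List Char) (ans : Int)
    (h : σ.head? ≠ some a ∨ c ≠ b) :
    solveLoop pts a b (c :: rest) σ ans = solveLoop pts a b rest (c :: σ) ans := by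
  cases σ with
  | nil => simp [solveLoop]
  | cons t tl =>
    have hno : ¬ (t = a ∧ c = b) := by
      rcases h with h | h
      · intro hc; exact h (by rw [hc.1]; rfl)
      · intro hc; exact h hc.2
    simp only [solveLoop]
    rw [if_neg hno]

theorem solveLoop_pop (pts : Int) (a b c t : Char) (rest tl : List Char) (ans : Int)
    (h : t = a ∧ c = b) :
    solveLoop pts a b (c :: rest) (t :: tl) ans = solveLoop pts a b rest tl (ans + pts) := by
  simp only [solveLoop]
  rw [if_pos h]

-- head of the structured stack is never a when opn = 0
theorem head_ne_a (a b : Char) (j : ℕ) (R : List Char) (hab : a ≠ b) (hR : InertOk a b R) :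
    (List.replicate j b ++ R).head? ≠ some a := by
  cases j with
  | zero =>
    cases R with
    | nil => simp
    | cons e R' => simpa using fun he => hR.1 he
  | succ n => simpa [List.replicate_succ] using fun he => hab he.symm

-- A's total from a structured stack = B's one-pass state
theorem main_lemma (x y : Int) (a b : Char) (hab : a ≠ b) :
    ∀ (s : List Char) (opn j m : ℕ) (ans : Int) (R : List Char), InertOk a b R →
      (let r1 := solveLoop x a b s (List.replicate opn a ++ List.replicate j b ++ R) ans
       r1.2 + p2 y a b r1.1)
        = altPass x y a b s (opn : Int) (j : Int) (m : Int) (ans + p2 y a b R - x * m) := by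
  intro s
  induction s with
  | nil =>
    intro opn j m ans R hR
    simp only [solveLoop, altPass]
    rw [p2_block y a b hab opn j R hR]
    rw [min_comm ((j : Int)) ((opn : Int)), show min (opn : Int) (j : Int) = ((min opn j : ℕ) : Int) by push_cast; rfl]
    ring
  | cons c rest ih =>
    intro opn j m ans R hR
    by_cases hca : c = a
    · -- push a
      subst hca
      have hstep : solveLoop x c b (c :: rest) (List.replicate opn c ++ List.replicate j b ++ R) ans
          = solveLoop x c b rest (List.replicate (opn + 1) c ++ List.replicate j b ++ R) ans := by
        rw [List.replicate_succ, List.cons_append, List.cons_append]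
        exact solveLoop_push x c b c rest _ ans (Or.inr hab)
      rw [hstep, ih (opn + 1) j m ans R hR]
      simp only [altPass]
      push_cast
      ring_nf
    · by_cases hcb : c = b
      · subst hcb
        have hba : ¬ ((c : Char) = a) := fun h => hab h.symm
        cases opn with
        | zero =>
          -- push c (=b)
          have hstep : solveLoop x a c (c :: rest) (List.replicate 0 a ++ List.replicate j c ++ R) ans
              = solveLoop x a c rest (List.replicate 0 a ++ List.replicate (j + 1) c ++ R) ans := by
            simp only [List.replicate_zero, List.nil_append]
            rw [List.replicate_succ, List.cons_append]
            exact solveLoop_push x a c c rest _ ans (Or.inl (head_ne_a a c j R hab hR))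
          rw [hstep, ih 0 (j + 1) m ans R hR]
          simp only [altPass, if_neg hba,
            if_neg (show ¬ (((0 : ℕ) : Int) > 0) by norm_num)]
          push_cast
          ring_nf
        | succ n =>
          -- pop
          have hstep : solveLoop x a c (c :: rest) (List.replicate (n + 1) a ++ List.replicate j c ++ R) ans
              = solveLoop x a c rest (List.replicate n a ++ List.replicate j c ++ R) (ans + x) := by
            rw [List.replicate_succ, List.cons_append, List.cons_append]
            exact solveLoop_pop x a c c a rest _ ans ⟨rfl, rfl⟩
          rw [hstep, ih n j (m + 1) (ans + x) R hR]
          simp only [altPass, if_neg hba,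
            if_pos (show (((n + 1 : ℕ) : Int) > 0) by positivity)]
          push_cast
          ring_nf
      · -- inert: flush
        have hstep : solveLoop x a b (c :: rest) (List.replicate opn a ++ List.replicate j b ++ R) ans
            = solveLoop x a b rest (c :: (List.replicate opn a ++ List.replicate j b ++ R)) ans := by
          exact solveLoop_push x a b c rest _ ans (Or.inr hcb)
        rw [hstep]
        have hR' : InertOk a b (c :: (List.replicate opn a ++ List.replicate j b ++ R)) := ⟨hca, hcb⟩
        have hih := ih 0 0 0 ans (c :: (List.replicate opn a ++ List.replicate j b ++ R)) hR'
        simp only [List.replicate_zero, List.nil_append] at hih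
        rw [hih]
        have hp2 : p2 y a b (c :: (List.replicate opn a ++ List.replicate j b ++ R))
            = y * (min opn j : ℕ) + p2 y a b R := by
          unfold p2
          rw [solveLoop_push y a b c (List.replicate opn a ++ List.replicate j b ++ R) [] 0
            (Or.inr hcb)]
          have hbot : (solveLoop y a b (List.replicate opn a ++ List.replicate j b ++ R) ([] ++ [c]) 0).2
              = (solveLoop y a b (List.replicate opn a ++ List.replicate j b ++ R) [] 0).2 :=
            solveLoop_bottom y a b hca _ [] 0
          simp only [List.nil_append] at hbot
          rw [hbot]
          exact p2_block y a b hab opn j R hR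
        rw [hp2]
        simp only [altPass, if_neg hca, if_neg hcb]
        rw [min_comm ((j : Int)) ((opn : Int)), show min (opn : Int) (j : Int) = ((min opn j : ℕ) : Int) by push_cast; rfl]
        push_cast
        ring_nf

-- fun = one-pass, from the empty start
theorem solveFun_eq (x y : Int) (a b : Char) (hab : a ≠ b) (s : List Char) :
    solveFun x y s a b = altPass x y a b s 0 0 0 0 := by
  unfold solveFun
  have hmain := main_lemma x y a b hab s 0 0 0 0 [] trivial
  simp only [List.replicate_zero, List.append_nil] at hmain
  simp only []
  rw [solveDrain_eq]
  simp only [List.nil_append]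
  have hadd : solveLoop y a b (solveLoop x a b s [] 0).1 [] (solveLoop x a b s [] 0).2
      = ((solveLoop y a b (solveLoop x a b s [] 0).1 [] 0).1,
         (solveLoop x a b s [] 0).2 + (solveLoop y a b (solveLoop x a b s [] 0).1 [] 0).2) := by
    rw [solveLoop_ans_add]
  rw [hadd]
  simp only []
  have hz : p2 y a b ([] : List Char) = 0 := by simp [p2, solveLoop]
  rw [hz] at hmain
  simpa [p2] using hmain

-- ===== VERDICT (by name: the statement is the Claim_ definition above) =====
theorem solve_spec : Claim_equal_solve := by
  intro X Y S _
  unfold Spec_solve solve solve_alt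
  by_cases h : X > Y
  · simp only [if_pos h]; exact solveFun_eq X Y 'p' 'r' (by decide) S.toList
  · simp only [if_neg h]; exact solveFun_eq Y X 'r' 'p' (by decide) S.toList
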